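-- pv_equiv track=rewrite | github.com/danrleyt/ds-and-algorithms | dynamic/exercises.py | add_until_100
-- ===== SOURCE A (Python) =====
-- def add_until_100(arr):
--     if len(arr) == 0:
--         return 0
--     remainder = add_until_100(arr[1:])
--     if arr[0] + remainder > 100:
--         return remainder
--     else:
--         return arr[0] + remainder
-- ===== SOURCE B (Python) =====
-- def add_until_100(arr):
--     total = 0
--     for x in reversed(arr):
--         if x + total <= 100:
--             total += x
--     return total
-- ===== Notes on version B (the rewrite author's own statement) =====
-- stated objective: faster
-- what changed: Replaced the recursion with O(n^2) list slicing by a single right-to-left loop with an accumulator (one pass, no copies).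
import Mathlib
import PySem

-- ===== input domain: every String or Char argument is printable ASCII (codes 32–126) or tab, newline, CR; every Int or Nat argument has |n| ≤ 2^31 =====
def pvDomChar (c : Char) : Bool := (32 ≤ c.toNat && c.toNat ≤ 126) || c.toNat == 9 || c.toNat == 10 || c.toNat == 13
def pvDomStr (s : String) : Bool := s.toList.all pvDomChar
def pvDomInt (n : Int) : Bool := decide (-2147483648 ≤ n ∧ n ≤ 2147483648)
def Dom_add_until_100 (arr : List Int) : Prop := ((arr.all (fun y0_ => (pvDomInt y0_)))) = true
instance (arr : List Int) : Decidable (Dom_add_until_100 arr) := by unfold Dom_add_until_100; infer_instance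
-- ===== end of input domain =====

-- B replaces A's recursion with O(n^2) slicing by one right-to-left accumulator loop (O(n)).


-- ===== PORT A =====
def add_until_100 (arr : List Int) : Int :=
  match arr with
  | [] => 0
  | a :: rest =>
    let remainder := add_until_100 rest
    if a + remainder > 100 then remainder else a + remainder

-- ===== PORT B =====
def add_until_100_alt (arr : List Int) : Int :=
  arr.reverse.foldl (fun total x => if x + total ≤ 100 then total + x else total) 0

-- ===== PRECONDITION & SPEC =====
def Spec_add_until_100 (arr : List Int) (out : Int) : Prop := out = add_until_100_alt arr
instance (arr : List Int) (out : Int) : Decidable (Spec_add_until_100 arr out) := by unfold Spec_add_until_100; infer_instance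

-- ===== CLAIM (what is proved, stated in full; the proofs are below) =====
def Claim_equal_add_until_100 : Prop := ∀ (arr : List Int), Dom_add_until_100 arr → Spec_add_until_100 arr (add_until_100 arr)

-- ===== LEMMAS AND PROOFS =====
theorem add_until_100_eq_alt (arr : List Int) : add_until_100 arr = add_until_100_alt arr := by
  induction arr with
  | nil => rfl
  | cons a rest ih =>
    simp only [add_until_100, add_until_100_alt, List.reverse_cons, List.foldl_append,
      List.foldl_cons, List.foldl_nil] at *
    rw [← ih]
    by_cases h : a + add_until_100 rest > 100
    · simp [h, show ¬ (a + add_until_100 rest ≤ 100) by omega]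
    · simp [h, show a + add_until_100 rest ≤ 100 by omega]
      omega

-- ===== VERDICT (by name: the statement is the Claim_ definition above) =====
theorem add_until_100_spec : Claim_equal_add_until_100 := by
  intro arr _
  unfold Spec_add_until_100
  exact add_until_100_eq_alt arr
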